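-- pv_equiv track=rewrite | github.com/raeez/chiral-bar-cobar | compute/lib/verdier_bar_cobar_pairing.py | _merge_sign
-- ===== SOURCE A (Python) =====
-- from typing import Dict, List, Optional, Tuple
--
-- def _merge_sign(a: List[int], b: List[int]) -> int:
--     """Sign of the shuffle permutation merging sorted lists a and b."""
--     merged = sorted(a + b)
--     # Count inversions: how many elements of b appear before elements of a
--     # in the combined sorted list
--     inversions = 0
--     b_set = set(b)
--     for i, x in enumerate(merged):
--         if x in b_set:
--             # Count elements of a that appear after position i in merged
--             # but before x in the original ordering
--             pass
--     # Simpler: count pairs (bi, aj) with bi < aj where bi is from b, aj from a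
--     inversions = sum(1 for bi in b for aj in a if bi < aj)
--     return (-1) ** inversions
-- ===== SOURCE B (Python) =====
-- from typing import List
--
-- def _merge_sign(a: List[int], b: List[int]) -> int:
--     """Sign of the shuffle permutation merging sorted lists a and b.
--
--     Two-pointer merge count: sort a and b once, then sweep b in increasing
--     order, advancing one pointer into sorted(a); each bi contributes the
--     number of remaining (strictly greater) elements of a.
--     """
--     sa = sorted(a)
--     inv = 0
--     i = 0
--     n = len(a)
--     for bi in sorted(b):
--         while i < n and sa[i] <= bi:
--             i += 1
--         inv += n - i
--     return 1 if inv % 2 == 0 else -1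
-- ===== Notes on version B (the rewrite author's own statement) =====
-- stated objective: faster
-- what changed: Replaced the O(|a|*|b|) double generator scan counting pairs bi<aj with a sort-then-two-pointer merge sweep that accumulates, for each bi of sorted(b), the count of remaining greater elements of sorted(a), returning 1/-1 by inversion parity.
import Mathlib
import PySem

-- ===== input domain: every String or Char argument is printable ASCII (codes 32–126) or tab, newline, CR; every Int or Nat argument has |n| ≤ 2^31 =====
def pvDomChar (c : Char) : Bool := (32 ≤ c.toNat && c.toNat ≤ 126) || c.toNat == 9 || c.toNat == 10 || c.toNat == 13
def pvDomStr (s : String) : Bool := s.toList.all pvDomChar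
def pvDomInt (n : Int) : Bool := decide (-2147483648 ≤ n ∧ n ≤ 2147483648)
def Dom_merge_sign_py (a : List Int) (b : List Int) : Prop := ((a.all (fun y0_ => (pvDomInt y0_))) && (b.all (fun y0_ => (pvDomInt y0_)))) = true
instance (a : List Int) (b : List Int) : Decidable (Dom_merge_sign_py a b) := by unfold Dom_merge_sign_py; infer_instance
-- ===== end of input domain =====

-- B replaces A's O(m*n) pair scan by a sort-then-two-pointer merge sweep (objective: faster).

-- ===== PORT A =====
-- A computes `merged` and `b_set` and runs a loop whose body is `pass`: no effect on the result.
def merge_sign_py (a : List Int) (b : List Int) : Int :=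
  let _merged := PySem.List.sorted (a ++ b) (fun x => x) false
  let _b_set := PySem.Set.ofList b
  -- the `for i, x in enumerate(merged)` loop only executes `pass`; `inversions` is then rebound:
  let inversions : Nat :=
    b.foldl (fun acc bi => a.foldl (fun acc2 aj => if bi < aj then acc2 + 1 else acc2) acc) 0
  (-1 : Int) ^ inversions

-- ===== PORT B =====
-- the `for bi in sorted(b)` loop with the inner `while` pointer advance: dropWhile consumes sa's prefix ≤ bi
def mergeSweep (sa : List Int) (sb : List Int) (inv : Nat) : Nat :=
  match sb with
  | [] => inv
  | bi :: rest =>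
    let sa' := sa.dropWhile (fun x => decide (x ≤ bi))
    mergeSweep sa' rest (inv + sa'.length)

def merge_sign_py_alt (a : List Int) (b : List Int) : Int :=
  let inv := mergeSweep (PySem.List.sorted a (fun x => x) false)
                        (PySem.List.sorted b (fun x => x) false) 0
  if inv % 2 = 0 then 1 else -1

-- ===== PRECONDITION & SPEC =====
def Spec_merge_sign_py (a : List Int) (b : List Int) (out : Int) : Prop := out = merge_sign_py_alt a b
instance (a : List Int) (b : List Int) (out : Int) : Decidable (Spec_merge_sign_py a b out) := by unfold Spec_merge_sign_py; infer_instance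

-- ===== CLAIM (what is proved, stated in full; the proofs are below) =====
def Claim_equal_merge_sign_py : Prop := ∀ (a : List Int) (b : List Int), Dom_merge_sign_py a b → Spec_merge_sign_py a b (merge_sign_py a b)

-- ===== LEMMAS AND PROOFS =====

-- A's inner loop counts the aj with bi < aj
theorem innerA (a : List Int) (bi : Int) (acc : Nat) :
    a.foldl (fun acc2 aj => if bi < aj then acc2 + 1 else acc2) acc
      = acc + a.countP (fun aj => decide (bi < aj)) := by
  induction a generalizing acc with
  | nil => simp
  | cons x xs ih =>
    simp only [List.foldl_cons, List.countP_cons, ih]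
    by_cases h : bi < x <;> simp [h, Nat.add_assoc, Nat.add_comm 1]

-- A's double loop is the sum over b of those counts
theorem outerA (a : List Int) (b : List Int) (acc : Nat) :
    b.foldl (fun acc bi => a.foldl (fun acc2 aj => if bi < aj then acc2 + 1 else acc2) acc) acc
      = acc + (b.map (fun bi => a.countP (fun aj => decide (bi < aj)))).sum := by
  induction b generalizing acc with
  | nil => simp
  | cons y ys ih =>
    rw [List.foldl_cons, innerA, ih, List.map_cons, List.sum_cons]; omega

-- on a nondecreasing list, dropping the prefix ≤ bi is filtering the elements > bi
theorem dropWhile_sorted_eq_filter (bi : Int) (sa : List Int)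
    (h : sa.Pairwise (· ≤ ·)) :
    sa.dropWhile (fun x => decide (x ≤ bi)) = sa.filter (fun x => decide (bi < x)) := by
  induction sa with
  | nil => rfl
  | cons x xs ih =>
    rcases List.pairwise_cons.mp h with ⟨hx, hxs⟩
    by_cases hle : x ≤ bi
    · simp [hle, not_lt.mpr hle, ih hxs]
    · have hbi : bi < x := lt_of_not_ge hle
      have : ∀ y ∈ x :: xs, bi < y := by
        intro y hy
        rcases List.mem_cons.mp hy with rfl | hy
        · exact hbi
        · exact lt_of_lt_of_le hbi (hx y hy)
      rw [List.dropWhile_cons_of_neg (by simpa using hle)]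
      rw [List.filter_eq_self.mpr (by intro y hy; simpa using this y hy)]

-- the merge sweep accumulates exactly the per-bi counts, for sorted inputs
theorem mergeSweep_eq (sa sb : List Int) (inv : Nat)
    (hsa : sa.Pairwise (· ≤ ·)) (hsb : sb.Pairwise (· ≤ ·)) :
    mergeSweep sa sb inv
      = inv + (sb.map (fun bi => sa.countP (fun x => decide (bi < x)))).sum := by
  induction sb generalizing sa inv with
  | nil => simp [mergeSweep]
  | cons bi rest ih =>
    rcases List.pairwise_cons.mp hsb with ⟨hbi, hrest⟩
    have hdrop := dropWhile_sorted_eq_filter bi sa hsa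
    have hsa' : (sa.dropWhile (fun x => decide (x ≤ bi))).Pairwise (· ≤ ·) :=
      List.Pairwise.sublist (List.dropWhile_sublist _) hsa
    rw [mergeSweep, ih _ _ hsa' hrest]
    have hlen : (sa.dropWhile (fun x => decide (x ≤ bi))).length
        = sa.countP (fun x => decide (bi < x)) := by
      rw [hdrop, List.countP_eq_length_filter]
    have hcount : ∀ bj ∈ rest,
        (sa.dropWhile (fun x => decide (x ≤ bi))).countP (fun x => decide (bj < x))
          = sa.countP (fun x => decide (bj < x)) := by
      intro bj hbj
      rw [hdrop, List.countP_filter]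
      apply List.countP_congr
      intro x _
      have : bj < x → bi < x := fun h => lt_of_le_of_lt (hbi bj hbj) h
      by_cases hb : bj < x <;> simp [hb, this]
    have hmap : rest.map (fun bj =>
          (sa.dropWhile (fun x => decide (x ≤ bi))).countP (fun x => decide (bj < x)))
        = rest.map (fun bj => sa.countP (fun x => decide (bj < x))) :=
      List.map_congr_left hcount
    rw [hmap, hlen]
    simp; omega

-- the inversion totals of A and B agree
theorem inv_eq (a b : List Int) :
    b.foldl (fun acc bi => a.foldl (fun acc2 aj => if bi < aj then acc2 + 1 else acc2) acc) 0
      = mergeSweep (PySem.List.sorted a (fun x => x) false)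
                   (PySem.List.sorted b (fun x => x) false) 0 := by
  rw [outerA, mergeSweep_eq _ _ _ (by simpa using PySem.List.sorted_pairwise a (fun x => x))
        (by simpa using PySem.List.sorted_pairwise b (fun x => x))]
  have hperm_b : (PySem.List.sorted b (fun x => x) false).Perm b := PySem.List.sorted_perm b _ _
  have hperm_a : (PySem.List.sorted a (fun x => x) false).Perm a := PySem.List.sorted_perm a _ _
  have hmap : ∀ bi : Int,
      (PySem.List.sorted a (fun x => x) false).countP (fun x => decide (bi < x))
        = a.countP (fun aj => decide (bi < aj)) := fun bi => hperm_a.countP_eq _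
  calc 0 + (b.map (fun bi => a.countP (fun aj => decide (bi < aj)))).sum
      = 0 + ((PySem.List.sorted b (fun x => x) false).map
          (fun bi => a.countP (fun aj => decide (bi < aj)))).sum := by
        rw [(hperm_b.map (fun bi => a.countP (fun aj => decide (bi < aj)))).sum_eq]
    _ = 0 + ((PySem.List.sorted b (fun x => x) false).map
          (fun bi => (PySem.List.sorted a (fun x => x) false).countP
            (fun x => decide (bi < x)))).sum := by
        congr 1; congr 1; exact (List.map_congr_left (fun bi _ => (hmap bi).symm))

theorem neg_one_pow_parity (n : Nat) :
    (-1 : Int) ^ n = if n % 2 = 0 then 1 else -1 := by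
  rcases Nat.even_or_odd n with h | h
  · rw [h.neg_one_pow, if_pos (Nat.even_iff.mp h)]
  · have := Nat.odd_iff.mp h
    rw [h.neg_one_pow, if_neg (by omega)]

-- ===== VERDICT (by name: the statement is the Claim_ definition above) =====
theorem merge_sign_py_spec : Claim_equal_merge_sign_py := by
  intro a b _
  unfold Spec_merge_sign_py merge_sign_py merge_sign_py_alt
  rw [inv_eq, neg_one_pow_parity]
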